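-- pv_equiv track=rewrite | github.com/juliengonde-5G/mytowt | app/routers/onboard_router.py | _build_doc_paragraphs
-- ===== SOURCE A (Python) =====
-- def _build_doc_paragraphs(doc_data: dict, doc_type: str, prefill: dict) -> list:
--     """Build a list of (label, value) pairs for document rendering."""
--     # Common header fields
--     rows = [
--         ("Vessel", doc_data.get("vessel_name", prefill.get("vessel_name", ""))),
--         ("Voyage No", doc_data.get("voyage_no", prefill.get("voyage_no", ""))),
--     ]
--
--     if doc_type == "NOR":
--         rows += [
--             ("To", doc_data.get("to_charterer", "")),
--             ("Port", doc_data.get("port", "")),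
--             ("Date of Notice", doc_data.get("notice_date", "")),
--             ("Time of Notice (LT)", doc_data.get("notice_time", "")),
--             ("Cargo description", doc_data.get("cargo_desc", "")),
--             ("Position", doc_data.get("position", "")),
--             ("Remarks", doc_data.get("remarks", "")),
--             ("Master", doc_data.get("master_name", "")),
--         ]
--     elif doc_type == "NOR_RT":
--         rows += [
--             ("To", doc_data.get("to_charterer", "")),
--             ("Port", doc_data.get("port", "")),
--             ("Reason for re-tendering", doc_data.get("reason", "")),
--             ("Date", doc_data.get("notice_date", "")),
--             ("Time (LT)", doc_data.get("notice_time", "")),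
--             ("Master", doc_data.get("master_name", "")),
--         ]
--     elif doc_type == "HOLDS_CERT":
--         rows += [
--             ("To", doc_data.get("to", "")),
--             ("Port", doc_data.get("port", "")),
--             ("Cargo to be loaded", doc_data.get("cargo", "")),
--             ("Date of inspection", doc_data.get("inspection_date", "")),
--             ("Holds inspected", doc_data.get("holds_list", "")),
--             ("Result / Observations", doc_data.get("observations", "")),
--             ("Chief Officer / Master", doc_data.get("officer_name", "")),
--             ("Surveyor / Terminal", doc_data.get("surveyor", "")),
--         ]
--     elif doc_type in ("KEY_MEETING", "PRE_MEETING"):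
--         rows += [
--             ("Port", doc_data.get("port", "")),
--             ("Date", doc_data.get("meeting_date", "")),
--             ("Attendees", doc_data.get("attendees", doc_data.get("terminal", ""))),
--             ("Content", doc_data.get("key_points", doc_data.get("plan", ""))),
--             ("Actions", doc_data.get("actions", doc_data.get("emergency", ""))),
--         ]
--     elif doc_type.startswith("LOP"):
--         rows += [
--             ("To", doc_data.get("to", "")),
--             ("Port", doc_data.get("port", "")),
--             ("Date", doc_data.get("lop_date", "")),
--             ("Time", doc_data.get("lop_time", "")),
--             ("Subject", doc_data.get("subject", "")),
--             ("Details", doc_data.get("details", "")),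
--             ("Reserve", doc_data.get("reserve", "")),
--             ("Master", doc_data.get("master_name", "")),
--             ("Countersigned", doc_data.get("countersigned", "")),
--         ]
--     elif doc_type == "MATES_RECEIPT":
--         rows += [
--             ("Port of loading", doc_data.get("port_loading", "")),
--             ("Date", doc_data.get("receipt_date", "")),
--             ("Shipper", doc_data.get("shipper", "")),
--             ("Cargo description", doc_data.get("cargo_desc", "")),
--             ("Number of packages", doc_data.get("packages", "")),
--             ("Gross weight (kg)", doc_data.get("weight", "")),
--             ("Condition / Remarks", doc_data.get("condition", "")),
--             ("Chief Officer", doc_data.get("officer_name", "")),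
--         ]
--     else:
--         rows += [
--             ("Port", doc_data.get("port", "")),
--             ("Date", doc_data.get("doc_date", "")),
--             ("Content", doc_data.get("content", "")),
--         ]
--
--     return [(k, v) for k, v in rows if v]
-- ===== SOURCE B (Python) =====
-- # Single flat scan over one global rule table: every row of every document type
-- # lives in ONE list tagged with a selector ("*" any / exact names / "LOP*" prefix
-- # / () default); one uniform loop tests each rule's selector against doc_type and
-- # emits the row if its value is truthy -- no per-type dispatch or branch blocks.
--
-- _KNOWN = {"NOR", "NOR_RT", "HOLDS_CERT", "KEY_MEETING", "PRE_MEETING", "MATES_RECEIPT"}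
--
-- # (selector, label, key chain tried in doc_data, prefill fallback on first key?)
-- _TABLE = [
--     (("*",), "Vessel", ("vessel_name",), True),
--     (("*",), "Voyage No", ("voyage_no",), True),
--     (("NOR",), "To", ("to_charterer",), False),
--     (("NOR",), "Port", ("port",), False),
--     (("NOR",), "Date of Notice", ("notice_date",), False),
--     (("NOR",), "Time of Notice (LT)", ("notice_time",), False),
--     (("NOR",), "Cargo description", ("cargo_desc",), False),
--     (("NOR",), "Position", ("position",), False),
--     (("NOR",), "Remarks", ("remarks",), False),
--     (("NOR",), "Master", ("master_name",), False),
--     (("NOR_RT",), "To", ("to_charterer",), False),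
--     (("NOR_RT",), "Port", ("port",), False),
--     (("NOR_RT",), "Reason for re-tendering", ("reason",), False),
--     (("NOR_RT",), "Date", ("notice_date",), False),
--     (("NOR_RT",), "Time (LT)", ("notice_time",), False),
--     (("NOR_RT",), "Master", ("master_name",), False),
--     (("HOLDS_CERT",), "To", ("to",), False),
--     (("HOLDS_CERT",), "Port", ("port",), False),
--     (("HOLDS_CERT",), "Cargo to be loaded", ("cargo",), False),
--     (("HOLDS_CERT",), "Date of inspection", ("inspection_date",), False),
--     (("HOLDS_CERT",), "Holds inspected", ("holds_list",), False),
--     (("HOLDS_CERT",), "Result / Observations", ("observations",), False),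
--     (("HOLDS_CERT",), "Chief Officer / Master", ("officer_name",), False),
--     (("HOLDS_CERT",), "Surveyor / Terminal", ("surveyor",), False),
--     (("KEY_MEETING", "PRE_MEETING"), "Port", ("port",), False),
--     (("KEY_MEETING", "PRE_MEETING"), "Date", ("meeting_date",), False),
--     (("KEY_MEETING", "PRE_MEETING"), "Attendees", ("attendees", "terminal"), False),
--     (("KEY_MEETING", "PRE_MEETING"), "Content", ("key_points", "plan"), False),
--     (("KEY_MEETING", "PRE_MEETING"), "Actions", ("actions", "emergency"), False),
--     (("LOP*",), "To", ("to",), False),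
--     (("LOP*",), "Port", ("port",), False),
--     (("LOP*",), "Date", ("lop_date",), False),
--     (("LOP*",), "Time", ("lop_time",), False),
--     (("LOP*",), "Subject", ("subject",), False),
--     (("LOP*",), "Details", ("details",), False),
--     (("LOP*",), "Reserve", ("reserve",), False),
--     (("LOP*",), "Master", ("master_name",), False),
--     (("LOP*",), "Countersigned", ("countersigned",), False),
--     (("MATES_RECEIPT",), "Port of loading", ("port_loading",), False),
--     (("MATES_RECEIPT",), "Date", ("receipt_date",), False),
--     (("MATES_RECEIPT",), "Shipper", ("shipper",), False),
--     (("MATES_RECEIPT",), "Cargo description", ("cargo_desc",), False),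
--     (("MATES_RECEIPT",), "Number of packages", ("packages",), False),
--     (("MATES_RECEIPT",), "Gross weight (kg)", ("weight",), False),
--     (("MATES_RECEIPT",), "Condition / Remarks", ("condition",), False),
--     (("MATES_RECEIPT",), "Chief Officer", ("officer_name",), False),
--     ((), "Port", ("port",), False),
--     ((), "Date", ("doc_date",), False),
--     ((), "Content", ("content",), False),
-- ]
--
--
-- def _matches(sel, doc_type, known):
--     if not sel:
--         return not known
--     return any(t == "*" or doc_type == t
--                or (t.endswith("*") and doc_type.startswith(t[:-1]))
--                for t in sel)
--
--
-- def _build_doc_paragraphs(doc_data: dict, doc_type: str, prefill: dict) -> list: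
--     known = doc_type in _KNOWN or doc_type.startswith("LOP")
--     out = []
--     for sel, label, keys, pf in _TABLE:
--         if _matches(sel, doc_type, known):
--             for k in keys:
--                 if k in doc_data:
--                     v = doc_data[k]
--                     break
--             else:
--                 v = prefill.get(keys[0], "") if pf else ""
--             if v:
--                 out.append((label, v))
--     return out
-- ===== Notes on version B (the rewrite author's own statement) =====
-- stated objective: alternative
-- what changed: A dispatches on doc_type through an if/elif chain that appends one per-type block of rows and filters the built list afterwards; B instead keeps every row of every document type in one flat rule list tagged with a selector ('*' any / exact names / 'LOP*' prefix / empty = default) and makes a single scan over that list, testing each rule's selector against doc_type, resolving the first present key (with prefill fallback only on header rules) and emitting non-empty values inline.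
import Mathlib
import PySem

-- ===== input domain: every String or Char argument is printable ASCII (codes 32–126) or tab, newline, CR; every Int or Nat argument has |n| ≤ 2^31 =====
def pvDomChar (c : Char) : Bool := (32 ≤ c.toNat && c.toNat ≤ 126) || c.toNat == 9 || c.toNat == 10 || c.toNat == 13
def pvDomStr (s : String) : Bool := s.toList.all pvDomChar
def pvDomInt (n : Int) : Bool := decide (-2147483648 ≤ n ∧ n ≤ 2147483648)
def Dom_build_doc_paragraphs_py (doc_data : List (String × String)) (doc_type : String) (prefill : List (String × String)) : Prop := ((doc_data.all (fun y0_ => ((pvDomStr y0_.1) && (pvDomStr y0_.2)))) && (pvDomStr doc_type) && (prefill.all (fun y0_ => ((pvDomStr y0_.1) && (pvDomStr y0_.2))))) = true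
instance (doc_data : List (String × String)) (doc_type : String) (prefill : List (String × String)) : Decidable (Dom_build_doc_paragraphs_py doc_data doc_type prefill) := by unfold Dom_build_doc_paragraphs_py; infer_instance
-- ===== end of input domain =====

-- B replaces A's per-type branch blocks by ONE flat rule table covering every row of
-- every document type, scanned once with a selector-match test per rule (objective: simpler).

-- ===== PORT A =====
def build_doc_paragraphs_py (doc_data : List (String × String)) (doc_type : String) (prefill : List (String × String)) : List (String × String) :=
  let d := PySem.Dict.mk doc_data
  let p := PySem.Dict.mk prefill
  let rows : List (String × String) :=
    [("Vessel", d.getD "vessel_name" (p.getD "vessel_name" "")),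
     ("Voyage No", d.getD "voyage_no" (p.getD "voyage_no" ""))]
  let rows :=
    if doc_type = "NOR" then
      rows ++
        [("To", d.getD "to_charterer" ""),
         ("Port", d.getD "port" ""),
         ("Date of Notice", d.getD "notice_date" ""),
         ("Time of Notice (LT)", d.getD "notice_time" ""),
         ("Cargo description", d.getD "cargo_desc" ""),
         ("Position", d.getD "position" ""),
         ("Remarks", d.getD "remarks" ""),
         ("Master", d.getD "master_name" "")]
    else if doc_type = "NOR_RT" then
      rows ++
        [("To", d.getD "to_charterer" ""),
         ("Port", d.getD "port" ""),
         ("Reason for re-tendering", d.getD "reason" ""),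
         ("Date", d.getD "notice_date" ""),
         ("Time (LT)", d.getD "notice_time" ""),
         ("Master", d.getD "master_name" "")]
    else if doc_type = "HOLDS_CERT" then
      rows ++
        [("To", d.getD "to" ""),
         ("Port", d.getD "port" ""),
         ("Cargo to be loaded", d.getD "cargo" ""),
         ("Date of inspection", d.getD "inspection_date" ""),
         ("Holds inspected", d.getD "holds_list" ""),
         ("Result / Observations", d.getD "observations" ""),
         ("Chief Officer / Master", d.getD "officer_name" ""),
         ("Surveyor / Terminal", d.getD "surveyor" "")]
    else if doc_type = "KEY_MEETING" ∨ doc_type = "PRE_MEETING" then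
      rows ++
        [("Port", d.getD "port" ""),
         ("Date", d.getD "meeting_date" ""),
         ("Attendees", d.getD "attendees" (d.getD "terminal" "")),
         ("Content", d.getD "key_points" (d.getD "plan" "")),
         ("Actions", d.getD "actions" (d.getD "emergency" ""))]
    else if PySem.Str.startswith doc_type "LOP" then
      rows ++
        [("To", d.getD "to" ""),
         ("Port", d.getD "port" ""),
         ("Date", d.getD "lop_date" ""),
         ("Time", d.getD "lop_time" ""),
         ("Subject", d.getD "subject" ""),
         ("Details", d.getD "details" ""),
         ("Reserve", d.getD "reserve" ""),
         ("Master", d.getD "master_name" ""),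
         ("Countersigned", d.getD "countersigned" "")]
    else if doc_type = "MATES_RECEIPT" then
      rows ++
        [("Port of loading", d.getD "port_loading" ""),
         ("Date", d.getD "receipt_date" ""),
         ("Shipper", d.getD "shipper" ""),
         ("Cargo description", d.getD "cargo_desc" ""),
         ("Number of packages", d.getD "packages" ""),
         ("Gross weight (kg)", d.getD "weight" ""),
         ("Condition / Remarks", d.getD "condition" ""),
         ("Chief Officer", d.getD "officer_name" "")]
    else
      rows ++
        [("Port", d.getD "port" ""),
         ("Date", d.getD "doc_date" ""),
         ("Content", d.getD "content" "")]
  rows.filter (fun kv => kv.2 ≠ "")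

-- ===== PORT B =====
-- _KNOWN (a Python set of string literals; membership only, ported as list membership)
def pvKnownTypes : List String :=
  ["NOR", "NOR_RT", "HOLDS_CERT", "KEY_MEETING", "PRE_MEETING", "MATES_RECEIPT"]

-- _TABLE: (selector, label, key chain, prefill fallback?)
def pvTable : List (List String × String × List String × Bool) :=
  [(["*"], "Vessel", ["vessel_name"], true),
   (["*"], "Voyage No", ["voyage_no"], true),
   (["NOR"], "To", ["to_charterer"], false),
   (["NOR"], "Port", ["port"], false),
   (["NOR"], "Date of Notice", ["notice_date"], false),
   (["NOR"], "Time of Notice (LT)", ["notice_time"], false),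
   (["NOR"], "Cargo description", ["cargo_desc"], false),
   (["NOR"], "Position", ["position"], false),
   (["NOR"], "Remarks", ["remarks"], false),
   (["NOR"], "Master", ["master_name"], false),
   (["NOR_RT"], "To", ["to_charterer"], false),
   (["NOR_RT"], "Port", ["port"], false),
   (["NOR_RT"], "Reason for re-tendering", ["reason"], false),
   (["NOR_RT"], "Date", ["notice_date"], false),
   (["NOR_RT"], "Time (LT)", ["notice_time"], false),
   (["NOR_RT"], "Master", ["master_name"], false),
   (["HOLDS_CERT"], "To", ["to"], false),
   (["HOLDS_CERT"], "Port", ["port"], false),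
   (["HOLDS_CERT"], "Cargo to be loaded", ["cargo"], false),
   (["HOLDS_CERT"], "Date of inspection", ["inspection_date"], false),
   (["HOLDS_CERT"], "Holds inspected", ["holds_list"], false),
   (["HOLDS_CERT"], "Result / Observations", ["observations"], false),
   (["HOLDS_CERT"], "Chief Officer / Master", ["officer_name"], false),
   (["HOLDS_CERT"], "Surveyor / Terminal", ["surveyor"], false),
   (["KEY_MEETING", "PRE_MEETING"], "Port", ["port"], false),
   (["KEY_MEETING", "PRE_MEETING"], "Date", ["meeting_date"], false),
   (["KEY_MEETING", "PRE_MEETING"], "Attendees", ["attendees", "terminal"], false),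
   (["KEY_MEETING", "PRE_MEETING"], "Content", ["key_points", "plan"], false),
   (["KEY_MEETING", "PRE_MEETING"], "Actions", ["actions", "emergency"], false),
   (["LOP*"], "To", ["to"], false),
   (["LOP*"], "Port", ["port"], false),
   (["LOP*"], "Date", ["lop_date"], false),
   (["LOP*"], "Time", ["lop_time"], false),
   (["LOP*"], "Subject", ["subject"], false),
   (["LOP*"], "Details", ["details"], false),
   (["LOP*"], "Reserve", ["reserve"], false),
   (["LOP*"], "Master", ["master_name"], false),
   (["LOP*"], "Countersigned", ["countersigned"], false),
   (["MATES_RECEIPT"], "Port of loading", ["port_loading"], false),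
   (["MATES_RECEIPT"], "Date", ["receipt_date"], false),
   (["MATES_RECEIPT"], "Shipper", ["shipper"], false),
   (["MATES_RECEIPT"], "Cargo description", ["cargo_desc"], false),
   (["MATES_RECEIPT"], "Number of packages", ["packages"], false),
   (["MATES_RECEIPT"], "Gross weight (kg)", ["weight"], false),
   (["MATES_RECEIPT"], "Condition / Remarks", ["condition"], false),
   (["MATES_RECEIPT"], "Chief Officer", ["officer_name"], false),
   ([], "Port", ["port"], false),
   ([], "Date", ["doc_date"], false),
   ([], "Content", ["content"], false)]

-- _matches(sel, doc_type, known)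
def pvMatches (sel : List String) (dt : String) (known : Bool) : Bool :=
  if sel.isEmpty then !known
  else sel.any (fun t =>
    t == "*" || dt == t ||
      (PySem.Str.endswith t "*" &&
        PySem.Str.startswith dt (PySem.Str.slice t none (some (-1)))))

-- the inner 'for k in keys: … break / else:' resolution; k0 is keys[0]
-- (keys is never empty in the table, so passing keys[0] as a default-carrying
-- argument is exact for every table entry)
def pvFirstAux (d p : PySem.Dict String String) (pf : Bool) (k0 : String) :
    List String → String
  | [] => if pf then p.getD k0 "" else ""
  | k :: ks =>
    match d.get? k with
    | some v => v
    | none => pvFirstAux d p pf k0 ks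

def pvFirst (d p : PySem.Dict String String) (pf : Bool) (keys : List String) : String :=
  pvFirstAux d p pf (keys.headD "") keys

-- the single 'for sel, label, keys, pf in _TABLE' loop
def pvScan (d p : PySem.Dict String String) (dt : String) (known : Bool) :
    List (List String × String × List String × Bool) → List (String × String)
  | [] => []
  | (sel, label, keys, pf) :: rest =>
    if pvMatches sel dt known then
      let v := pvFirst d p pf keys
      if v ≠ "" then (label, v) :: pvScan d p dt known rest
      else pvScan d p dt known rest
    else pvScan d p dt known rest

def build_doc_paragraphs_py_alt (doc_data : List (String × String)) (doc_type : String) (prefill : List (String × String)) : List (String × String) :=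
  let d := PySem.Dict.mk doc_data
  let p := PySem.Dict.mk prefill
  let known := pvKnownTypes.contains doc_type || PySem.Str.startswith doc_type "LOP"
  pvScan d p doc_type known pvTable

-- ===== PRECONDITION & SPEC =====
def Spec_build_doc_paragraphs_py (doc_data : List (String × String)) (doc_type : String) (prefill : List (String × String)) (out : List (String × String)) : Prop := out = build_doc_paragraphs_py_alt doc_data doc_type prefill
instance (doc_data : List (String × String)) (doc_type : String) (prefill : List (String × String)) (out : List (String × String)) : Decidable (Spec_build_doc_paragraphs_py doc_data doc_type prefill out) := by unfold Spec_build_doc_paragraphs_py; infer_instance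

-- ===== CLAIM (what is proved, stated in full; the proofs are below) =====
def Claim_equal_build_doc_paragraphs_py : Prop := ∀ (doc_data : List (String × String)) (doc_type : String) (prefill : List (String × String)), Dom_build_doc_paragraphs_py doc_data doc_type prefill → Spec_build_doc_paragraphs_py doc_data doc_type prefill (build_doc_paragraphs_py doc_data doc_type prefill)

-- ===== LEMMAS AND PROOFS =====

-- pvScan is the ≠""-filter of the values of the selector-matching table entries
theorem pvScan_eq (d p : PySem.Dict String String) (dt : String) (known : Bool)
    (table : List (List String × String × List String × Bool)) :
    pvScan d p dt known table =
      ((table.filter (fun e => pvMatches e.1 dt known)).map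
        (fun e => (e.2.1, pvFirst d p e.2.2.2 e.2.2.1))).filter
        (fun kv => kv.2 ≠ "") := by
  induction table with
  | nil => rfl
  | cons e rest ih =>
    obtain ⟨sel, label, keys, pf⟩ := e
    simp only [pvScan, List.filter]
    by_cases hm : pvMatches sel dt known
    · simp only [hm, if_true]
      by_cases hv : pvFirst d p pf keys ≠ ""
      · simp [hv, ih]
      · simp only [ne_eq, not_not] at hv
        simp [hv, ih]
    · simp [hm, ih]

theorem pvFirst_one (d p : PySem.Dict String String) (k : String) :
    pvFirst d p false [k] = d.getD k "" := by
  simp only [pvFirst, pvFirstAux, PySem.Dict.getD_eq_get?_getD]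
  cases d.get? k <;> rfl

theorem pvFirst_two (d p : PySem.Dict String String) (k₁ k₂ : String) :
    pvFirst d p false [k₁, k₂] = d.getD k₁ (d.getD k₂ "") := by
  simp only [pvFirst, pvFirstAux, PySem.Dict.getD_eq_get?_getD]
  cases d.get? k₁ <;> cases d.get? k₂ <;> rfl

theorem pvFirst_hdr (d p : PySem.Dict String String) (k : String) :
    pvFirst d p true [k] = d.getD k (p.getD k "") := by
  simp only [pvFirst, pvFirstAux, List.headD, PySem.Dict.getD_eq_get?_getD]
  cases d.get? k <;> cases p.get? k <;> rfl

theorem pvMatches_exact (t dt : String) (known : Bool) (hne : dt ≠ t) (hstar : t ≠ "*")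
    (hend : PySem.Chars.endswith t.toList ['*'] = false) :
    pvMatches [t] dt known = false := by
  simp [pvMatches, hne, hstar, hend]
theorem pvMatches_pair (t₁ t₂ dt : String) (known : Bool) (h₁ : dt ≠ t₁) (h₂ : dt ≠ t₂)
    (hs₁ : t₁ ≠ "*") (hs₂ : t₂ ≠ "*")
    (he₁ : PySem.Chars.endswith t₁.toList ['*'] = false)
    (he₂ : PySem.Chars.endswith t₂.toList ['*'] = false) :
    pvMatches [t₁, t₂] dt known = false := by
  simp [pvMatches, h₁, h₂, hs₁, hs₂, he₁, he₂]
theorem pvMatches_star (dt : String) (known : Bool) : pvMatches ["*"] dt known = true := by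
  simp [pvMatches]
theorem pvMatches_lop (dt : String) (known : Bool)
    (hL : PySem.Chars.startswith dt.toList ['L', 'O', 'P'] = true) :
    pvMatches ["LOP*"] dt known = true := by
  simp [pvMatches, PySem.List.slice_to_neg_one, hL,
    show PySem.Chars.endswith ['L', 'O', 'P', '*'] ['*'] = true from by decide]
theorem pvMatches_lop_neg (dt : String) (known : Bool)
    (hL : PySem.Chars.startswith dt.toList ['L', 'O', 'P'] = false) (hne : dt ≠ "LOP*") :
    pvMatches ["LOP*"] dt known = false := by
  simp [pvMatches, PySem.List.slice_to_neg_one, hL, hne]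
theorem pvMatches_default (dt : String) (known : Bool) : pvMatches [] dt known = !known := rfl

-- ===== VERDICT (by name: the statement is the Claim_ definition above) =====

theorem build_doc_paragraphs_py_spec : Claim_equal_build_doc_paragraphs_py := by
  intro doc_data doc_type prefill _
  unfold Spec_build_doc_paragraphs_py build_doc_paragraphs_py build_doc_paragraphs_py_alt
  set d := PySem.Dict.mk doc_data with hd
  set p := PySem.Dict.mk prefill with hp
  rw [pvScan_eq]
  by_cases h1 : doc_type = "NOR"
  · subst h1
    simp only [String.reduceEq, reduceIte]
    rw [show pvTable.filter (fun e => pvMatches e.1 "NOR" (pvKnownTypes.contains "NOR" || PySem.Str.startswith "NOR" "LOP")) = [(["*"], "Vessel", ["vessel_name"], true), (["*"], "Voyage No", ["voyage_no"], true), (["NOR"], "To", ["to_charterer"], false), (["NOR"], "Port", ["port"], false), (["NOR"], "Date of Notice", ["notice_date"], false), (["NOR"], "Time of Notice (LT)", ["notice_time"], false), (["NOR"], "Cargo description", ["cargo_desc"], false), (["NOR"], "Position", ["position"], false), (["NOR"], "Remarks", ["remarks"], false), (["NOR"], "Master", ["master_name"], false)] from by decide]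
    simp only [List.map]
    congr 1
    simp [pvFirst_one, pvFirst_hdr]
  by_cases h2 : doc_type = "NOR_RT"
  · subst h2
    simp only [String.reduceEq, reduceIte]
    rw [show pvTable.filter (fun e => pvMatches e.1 "NOR_RT" (pvKnownTypes.contains "NOR_RT" || PySem.Str.startswith "NOR_RT" "LOP")) = [(["*"], "Vessel", ["vessel_name"], true), (["*"], "Voyage No", ["voyage_no"], true), (["NOR_RT"], "To", ["to_charterer"], false), (["NOR_RT"], "Port", ["port"], false), (["NOR_RT"], "Reason for re-tendering", ["reason"], false), (["NOR_RT"], "Date", ["notice_date"], false), (["NOR_RT"], "Time (LT)", ["notice_time"], false), (["NOR_RT"], "Master", ["master_name"], false)] from by decide]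
    simp only [List.map]
    congr 1
    simp [pvFirst_one, pvFirst_hdr]
  by_cases h3 : doc_type = "HOLDS_CERT"
  · subst h3
    simp only [String.reduceEq, reduceIte]
    rw [show pvTable.filter (fun e => pvMatches e.1 "HOLDS_CERT" (pvKnownTypes.contains "HOLDS_CERT" || PySem.Str.startswith "HOLDS_CERT" "LOP")) = [(["*"], "Vessel", ["vessel_name"], true), (["*"], "Voyage No", ["voyage_no"], true), (["HOLDS_CERT"], "To", ["to"], false), (["HOLDS_CERT"], "Port", ["port"], false), (["HOLDS_CERT"], "Cargo to be loaded", ["cargo"], false), (["HOLDS_CERT"], "Date of inspection", ["inspection_date"], false), (["HOLDS_CERT"], "Holds inspected", ["holds_list"], false), (["HOLDS_CERT"], "Result / Observations", ["observations"], false), (["HOLDS_CERT"], "Chief Officer / Master", ["officer_name"], false), (["HOLDS_CERT"], "Surveyor / Terminal", ["surveyor"], false)] from by decide]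
    simp only [List.map]
    congr 1
    simp [pvFirst_one, pvFirst_hdr]
  by_cases h4 : doc_type = "KEY_MEETING" ∨ doc_type = "PRE_MEETING"
  · simp only [if_neg h1, if_neg h2, if_neg h3, if_pos h4]
    rcases h4 with h | h <;> subst h
    · rw [show pvTable.filter (fun e => pvMatches e.1 "KEY_MEETING" (pvKnownTypes.contains "KEY_MEETING" || PySem.Str.startswith "KEY_MEETING" "LOP")) = [(["*"], "Vessel", ["vessel_name"], true), (["*"], "Voyage No", ["voyage_no"], true), (["KEY_MEETING", "PRE_MEETING"], "Port", ["port"], false), (["KEY_MEETING", "PRE_MEETING"], "Date", ["meeting_date"], false), (["KEY_MEETING", "PRE_MEETING"], "Attendees", ["attendees", "terminal"], false), (["KEY_MEETING", "PRE_MEETING"], "Content", ["key_points", "plan"], false), (["KEY_MEETING", "PRE_MEETING"], "Actions", ["actions", "emergency"], false)] from by decide]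
      simp only [List.map]
      congr 1
      simp [pvFirst_one, pvFirst_two, pvFirst_hdr]
    · rw [show pvTable.filter (fun e => pvMatches e.1 "PRE_MEETING" (pvKnownTypes.contains "PRE_MEETING" || PySem.Str.startswith "PRE_MEETING" "LOP")) = [(["*"], "Vessel", ["vessel_name"], true), (["*"], "Voyage No", ["voyage_no"], true), (["KEY_MEETING", "PRE_MEETING"], "Port", ["port"], false), (["KEY_MEETING", "PRE_MEETING"], "Date", ["meeting_date"], false), (["KEY_MEETING", "PRE_MEETING"], "Attendees", ["attendees", "terminal"], false), (["KEY_MEETING", "PRE_MEETING"], "Content", ["key_points", "plan"], false), (["KEY_MEETING", "PRE_MEETING"], "Actions", ["actions", "emergency"], false)] from by decide]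
      simp only [List.map]
      congr 1
      simp [pvFirst_one, pvFirst_two, pvFirst_hdr]
  by_cases hL : PySem.Str.startswith doc_type "LOP" = true
  · have h6 : doc_type ≠ "MATES_RECEIPT" := by
      rintro rfl; exact absurd hL (by decide)
    have hK : doc_type ≠ "KEY_MEETING" := fun h => h4 (Or.inl h)
    have hP : doc_type ≠ "PRE_MEETING" := fun h => h4 (Or.inr h)
    have hk : (pvKnownTypes.contains doc_type || PySem.Str.startswith doc_type "LOP") = true := by
      rw [hL, Bool.or_true]
    simp only [if_neg h1, if_neg h2, if_neg h3, if_neg h4, if_pos hL, hk]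
    have hLc : PySem.Chars.startswith doc_type.toList ['L', 'O', 'P'] = true := by
      simpa using hL
    have hfilt : pvTable.filter (fun e => pvMatches e.1 doc_type true) = [(["*"], "Vessel", ["vessel_name"], true), (["*"], "Voyage No", ["voyage_no"], true), (["LOP*"], "To", ["to"], false), (["LOP*"], "Port", ["port"], false), (["LOP*"], "Date", ["lop_date"], false), (["LOP*"], "Time", ["lop_time"], false), (["LOP*"], "Subject", ["subject"], false), (["LOP*"], "Details", ["details"], false), (["LOP*"], "Reserve", ["reserve"], false), (["LOP*"], "Master", ["master_name"], false), (["LOP*"], "Countersigned", ["countersigned"], false)] := by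
      simp only [pvTable, List.filter, pvMatches_star,
        pvMatches_exact "NOR" doc_type true h1 (by decide) (by decide),
        pvMatches_exact "NOR_RT" doc_type true h2 (by decide) (by decide),
        pvMatches_exact "HOLDS_CERT" doc_type true h3 (by decide) (by decide),
        pvMatches_exact "MATES_RECEIPT" doc_type true h6 (by decide) (by decide),
        pvMatches_pair "KEY_MEETING" "PRE_MEETING" doc_type true hK hP (by decide) (by decide) (by decide) (by decide),
        pvMatches_lop doc_type true hLc, pvMatches_default, Bool.not_true]
    rw [hfilt]
    simp only [List.map]
    congr 1
    simp [pvFirst_one, pvFirst_hdr]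
  by_cases h6 : doc_type = "MATES_RECEIPT"
  · subst h6
    simp only [String.reduceEq, reduceIte]
    rw [show pvTable.filter (fun e => pvMatches e.1 "MATES_RECEIPT" (pvKnownTypes.contains "MATES_RECEIPT" || PySem.Str.startswith "MATES_RECEIPT" "LOP")) = [(["*"], "Vessel", ["vessel_name"], true), (["*"], "Voyage No", ["voyage_no"], true), (["MATES_RECEIPT"], "Port of loading", ["port_loading"], false), (["MATES_RECEIPT"], "Date", ["receipt_date"], false), (["MATES_RECEIPT"], "Shipper", ["shipper"], false), (["MATES_RECEIPT"], "Cargo description", ["cargo_desc"], false), (["MATES_RECEIPT"], "Number of packages", ["packages"], false), (["MATES_RECEIPT"], "Gross weight (kg)", ["weight"], false), (["MATES_RECEIPT"], "Condition / Remarks", ["condition"], false), (["MATES_RECEIPT"], "Chief Officer", ["officer_name"], false)] from by decide]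
    simp only [List.map]
    congr 1
    simp [pvFirst_one, pvFirst_hdr]
    decide
  · have hK : doc_type ≠ "KEY_MEETING" := fun h => h4 (Or.inl h)
    have hP : doc_type ≠ "PRE_MEETING" := fun h => h4 (Or.inr h)
    have hLf : PySem.Str.startswith doc_type "LOP" = false := by
      simpa using hL
    have hLc : PySem.Chars.startswith doc_type.toList ['L', 'O', 'P'] = false := by
      have h := hLf
      simp only [PySem.Str.startswith_eq] at h
      exact h
    have hk : (pvKnownTypes.contains doc_type || PySem.Str.startswith doc_type "LOP") = false := by
      simp [pvKnownTypes, h1, h2, h3, h6, hK, hP, hLc]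
    simp only [if_neg h1, if_neg h2, if_neg h3, if_neg h4, if_neg hL, if_neg h6, hk]
    have hne : doc_type ≠ "LOP*" := by
      rintro rfl; exact absurd hLf (by decide)
    have hfilt : pvTable.filter (fun e => pvMatches e.1 doc_type false) = [(["*"], "Vessel", ["vessel_name"], true), (["*"], "Voyage No", ["voyage_no"], true), (([] : List String), "Port", ["port"], false), (([] : List String), "Date", ["doc_date"], false), (([] : List String), "Content", ["content"], false)] := by
      simp only [pvTable, List.filter, pvMatches_star,
        pvMatches_exact "NOR" doc_type false h1 (by decide) (by decide),
        pvMatches_exact "NOR_RT" doc_type false h2 (by decide) (by decide),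
        pvMatches_exact "HOLDS_CERT" doc_type false h3 (by decide) (by decide),
        pvMatches_exact "MATES_RECEIPT" doc_type false h6 (by decide) (by decide),
        pvMatches_pair "KEY_MEETING" "PRE_MEETING" doc_type false hK hP (by decide) (by decide) (by decide) (by decide),
        pvMatches_lop_neg doc_type false hLc hne, pvMatches_default, Bool.not_false]
    rw [hfilt]
    simp only [List.map]
    congr 1
    simp [pvFirst_one, pvFirst_hdr]
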